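-- pv_equiv track=rewrite | github.com/f4t4nt/BerkeleyCrosswordSolver | complete_search.py | try_hidden
-- ===== SOURCE A (Python) =====
-- def try_hidden(nondefn, ans):
--     cur = ''
--     pos = []
--     i = 0
--     while i < len(nondefn):
--         while i < len(nondefn) and not nondefn[i].isalpha():
--             i += 1
--         if i >= len(nondefn):
--             break
--         pos.append(i)
--         cur += nondefn[i]
--         if nondefn[i].islower():
--             nondefn = nondefn[:i] + nondefn[i].upper() + nondefn[i+1:]
--         if len(cur) > len(ans):
--             nondefn = nondefn[:pos[0]] + nondefn[pos[0]].lower() + nondefn[pos[0]+1:]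
--             cur = cur[1:]
--             pos = pos[1:]
--         if cur == ans:
--             words = nondefn.split()
--             return True, [words[k] for k in range(len(words)) if words[k] != words[k].lower()]
--         i += 1
--     return False, None
-- ===== SOURCE B (Python) =====
-- def try_hidden(nondefn, ans):
--     pos = [i for i, c in enumerate(nondefn) if c.isalpha()]
--     m = len(ans)
--     for j in range(max(m, 1) - 1, len(pos)):
--         lo = j + 1 - m
--         if ''.join(nondefn[p] for p in pos[lo:j + 1]) == ans:
--             chars = list(nondefn)
--             for idx in range(lo):
--                 chars[pos[idx]] = chars[pos[idx]].lower()
--             for idx in range(lo, j + 1):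
--                 chars[pos[idx]] = chars[pos[idx]].upper()
--             words = ''.join(chars).split()
--             return True, [w for w in words if w != w.lower()]
--     return False, None
-- ===== Notes on version B (the rewrite author's own statement) =====
-- stated objective: faster
-- what changed: A repeatedly rebuilds the string with slicing while sliding a character window; B precomputes the letter-position list once, slides an index window over it, and builds the cased output string in one pass only at the match.
import Mathlib
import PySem

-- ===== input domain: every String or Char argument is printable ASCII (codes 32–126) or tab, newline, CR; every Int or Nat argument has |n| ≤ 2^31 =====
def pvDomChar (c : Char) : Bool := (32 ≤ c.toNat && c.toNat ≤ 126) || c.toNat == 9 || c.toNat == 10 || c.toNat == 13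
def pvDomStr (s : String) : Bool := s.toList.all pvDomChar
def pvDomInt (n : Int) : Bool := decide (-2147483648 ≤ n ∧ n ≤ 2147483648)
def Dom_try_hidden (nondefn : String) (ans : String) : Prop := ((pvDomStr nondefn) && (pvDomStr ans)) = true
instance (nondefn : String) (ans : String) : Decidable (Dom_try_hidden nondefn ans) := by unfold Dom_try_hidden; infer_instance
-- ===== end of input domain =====

-- B replaces A's per-step O(n) string rebuilding and sliding char window by one precomputed
-- letter-position list scanned with an index window, building the cased output only at the
-- match (objective: faster; measured faster in a timing run).

-- ===== PORT A =====
-- words[k] != words[k].lower() comprehension: filter over the split words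
def wordsA (s : List Char) : List String :=
  ((PySem.Chars.split₀ s).filter (fun w => decide (w ≠ PySem.Chars.lower w))).map String.ofList

-- the merged while-loop of A: at each index i skip a non-letter, else do the body;
-- fuel = length - i (each step increments i by exactly 1, so fuel 0 ↔ i ≥ len)
def tryHiddenLoopA (ansL : List Char) : Nat → List Char → List Char → List Nat → Nat → Bool × Option (List String)
  | 0, _, _, _, _ => (false, none)
  | fuel+1, s, cur, pos, i =>
    if i < s.length then
      let c := s.getD i ' '       -- index i is in range here
      if PySem.Chars.isalpha c then
        let pos1 := pos ++ [i]
        let cur1 := cur ++ [c]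
        let s1 := if PySem.Chars.islower c then s.set i (PySem.Chars.upperChar c) else s
        let st :=
          if ansL.length < cur1.length then
            let p0 := pos1.headD 0          -- pos1 is nonempty: pos[0]
            (s1.set p0 (PySem.Chars.lowerChar (s1.getD p0 ' ')), cur1.tail, pos1.tail)
          else (s1, cur1, pos1)
        if st.2.1 = ansL then (true, some (wordsA st.1))
        else tryHiddenLoopA ansL fuel st.1 st.2.1 st.2.2 (i+1)
      else tryHiddenLoopA ansL fuel s cur pos (i+1)
    else (false, none)

def try_hidden (nondefn : String) (ans : String) : Bool × Option (List String) :=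
  tryHiddenLoopA ans.toList nondefn.toList.length nondefn.toList [] [] 0

-- ===== PORT B =====
-- [i for i, c in enumerate(nondefn) if c.isalpha()]
def altPos : List Char → Nat → List Nat
  | [], _ => []
  | c :: cs, i => if PySem.Chars.isalpha c then i :: altPos cs (i+1) else altPos cs (i+1)

-- for idx in range(lo): chars[pos[idx]] = chars[pos[idx]].lower()
def altSetLower (s : List Char) (ps : List Nat) : List Char :=
  ps.foldl (fun s p => s.set p (PySem.Chars.lowerChar (s.getD p ' '))) s

-- for idx in range(lo, j+1): chars[pos[idx]] = chars[pos[idx]].upper()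
def altSetUpper (s : List Char) (ps : List Nat) : List Char :=
  ps.foldl (fun s p => s.set p (PySem.Chars.upperChar (s.getD p ' '))) s

def altWindow (P : List Nat) (lo j : Nat) : List Nat := (P.take (j+1)).drop lo

def altBuild (t : List Char) (P : List Nat) (lo j : Nat) : List Char :=
  altSetUpper (altSetLower t (P.take lo)) (altWindow P lo j)

-- for j in range(max(m,1)-1, len(pos)); fuel = len(pos) - j
def tryHiddenLoopB (t ansL : List Char) (P : List Nat) : Nat → Nat → Bool × Option (List String)
  | 0, _ => (false, none)
  | fuel+1, j =>
    let lo := j + 1 - ansL.length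
    if (altWindow P lo j).map (fun p => t.getD p ' ') = ansL then
      (true, some (wordsA (altBuild t P lo j)))
    else tryHiddenLoopB t ansL P fuel (j+1)

def try_hidden_alt (nondefn : String) (ans : String) : Bool × Option (List String) :=
  let t := nondefn.toList
  let ansL := ans.toList
  let P := altPos t 0
  tryHiddenLoopB t ansL P (P.length - (max ansL.length 1 - 1)) (max ansL.length 1 - 1)

-- ===== PRECONDITION & SPEC =====
def Spec_try_hidden (nondefn : String) (ans : String) (out : Bool × Option (List String)) : Prop := out = try_hidden_alt nondefn ans
instance (nondefn : String) (ans : String) (out : Bool × Option (List String)) : Decidable (Spec_try_hidden nondefn ans out) := by unfold Spec_try_hidden; infer_instance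

-- ===== CLAIM (what is proved, stated in full; the proofs are below) =====
def Claim_equal_try_hidden : Prop := ∀ (nondefn : String) (ans : String), Dom_try_hidden nondefn ans → Spec_try_hidden nondefn ans (try_hidden nondefn ans)

-- ===== LEMMAS AND PROOFS =====

-- proof-only abbreviations: A's loop state after consuming k letters, in B's vocabulary
-- (m := ansL.length, P := letter positions): window positions, string state, window chars
def pvW (P : List Nat) (m k : Nat) : List Nat := (P.take k).drop (k - m)
def pvS (t : List Char) (P : List Nat) (m k : Nat) : List Char :=
  altSetUpper (altSetLower t (P.take (k - m))) (pvW P m k)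
def pvC (t : List Char) (P : List Nat) (m k : Nat) : List Char :=
  (pvW P m k).map (fun p => t.getD p ' ')

def pvFold (g : Char → Char) (s : List Char) (ps : List Nat) : List Char :=
  ps.foldl (fun s p => s.set p (g (s.getD p ' '))) s

theorem altSetLower_eq_pvFold (s ps) : altSetLower s ps = pvFold PySem.Chars.lowerChar s ps := rfl
theorem altSetUpper_eq_pvFold (s ps) : altSetUpper s ps = pvFold PySem.Chars.upperChar s ps := rfl

theorem pvFold_length (g ps) (s : List Char) : (pvFold g s ps).length = s.length := by
  induction ps generalizing s with
  | nil => rfl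
  | cons p ps ih => simp [pvFold, List.foldl] at *; rw [ih]; simp

theorem pvFold_getD (g : Char → Char) (ps : List Nat) (s : List Char) (hnd : ps.Nodup)
    (hlt : ∀ p ∈ ps, p < s.length) (q : Nat) :
    (pvFold g s ps).getD q ' ' = if q ∈ ps then g (s.getD q ' ') else s.getD q ' ' := by
  induction ps generalizing s with
  | nil => simp [pvFold]
  | cons p ps ih =>
    have hstep : pvFold g s (p :: ps) = pvFold g (s.set p (g (s.getD p ' '))) ps := rfl
    have hplen : p < s.length := hlt p (by simp)
    rw [hstep, ih _ hnd.of_cons (by intro x hx; simpa using hlt x (List.mem_cons_of_mem _ hx))]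
    by_cases hq : q = p
    · subst hq
      have : q ∉ ps := (List.nodup_cons.mp hnd).1
      simp [this, List.getD_eq_getElem?_getD, List.getElem?_set_self hplen]
    · have hmem : q ∈ p :: ps ↔ q ∈ ps := by simp [hq]
      have hget : (s.set p (g (s.getD p ' '))).getD q ' ' = s.getD q ' ' := by
        simp [List.getD_eq_getElem?_getD, List.getElem?_set_ne (fun h => hq h.symm)]
      rw [hget]
      simp [hmem]

theorem pvFold_append (g : Char → Char) (s : List Char) (xs : List Nat) (p : Nat) :
    pvFold g s (xs ++ [p]) =
      (pvFold g s xs).set p (g ((pvFold g s xs).getD p ' ')) := by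
  simp [pvFold, List.foldl_append]

theorem mem_altPos (t : List Char) (i p : Nat) :
    p ∈ altPos t i ↔ i ≤ p ∧ p - i < t.length ∧ PySem.Chars.isalpha (t.getD (p - i) ' ') = true := by
  induction t generalizing i with
  | nil => simp [altPos]
  | cons c cs ih =>
    by_cases hc : PySem.Chars.isalpha c = true
    · simp only [altPos, if_pos hc, List.mem_cons, ih]
      constructor
      · rintro (rfl | ⟨h1, h2, h3⟩)
        · simpa using hc
        · refine ⟨by omega, by simp; omega, ?_⟩
          have : p - i = (p - (i+1)) + 1 := by omega
          rw [this]; simpa using h3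
      · rintro ⟨h1, h2, h3⟩
        by_cases hpi : p = i
        · left; exact hpi
        · right
          refine ⟨by omega, by simp at h2 ⊢; omega, ?_⟩
          have : p - i = (p - (i+1)) + 1 := by omega
          rw [this] at h3; simpa using h3
    · simp only [altPos, if_neg hc, ih]
      constructor
      · rintro ⟨h1, h2, h3⟩
        refine ⟨by omega, by simp; omega, ?_⟩
        have : p - i = (p - (i+1)) + 1 := by omega
        rw [this]; simpa using h3
      · rintro ⟨h1, h2, h3⟩
        have hpi : p ≠ i := by
          rintro rfl; simp at h3; exact hc h3
        refine ⟨by omega, by simp at h2 ⊢; omega, ?_⟩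
        have : p - i = (p - (i+1)) + 1 := by omega
        rw [this] at h3; simpa using h3

theorem mem_altPos_zero (t : List Char) (p : Nat) :
    p ∈ altPos t 0 ↔ p < t.length ∧ PySem.Chars.isalpha (t.getD p ' ') = true := by
  simpa using mem_altPos t 0 p

theorem altPos_pairwise (t : List Char) (i : Nat) : (altPos t i).Pairwise (· < ·) := by
  induction t generalizing i with
  | nil => simp [altPos]
  | cons c cs ih =>
    simp only [altPos]
    split
    · refine List.Pairwise.cons ?_ (ih (i+1))
      intro p hp
      have := (mem_altPos cs (i+1) p).mp hp
      omega
    · exact ih (i+1)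

theorem islower_iff (c : Char) : PySem.Chars.islower c = true ↔ 97 ≤ c.toNat ∧ c.toNat ≤ 122 := by
  unfold PySem.Chars.islower
  rw [Bool.and_eq_true, decide_eq_true_iff, decide_eq_true_iff, Char.le_def, Char.le_def,
    UInt32.le_iff_toNat_le, UInt32.le_iff_toNat_le]
  constructor <;> intro h <;> exact h

theorem isupper_iff (c : Char) : PySem.Chars.isupper c = true ↔ 65 ≤ c.toNat ∧ c.toNat ≤ 90 := by
  unfold PySem.Chars.isupper
  rw [Bool.and_eq_true, decide_eq_true_iff, decide_eq_true_iff, Char.le_def, Char.le_def,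
    UInt32.le_iff_toNat_le, UInt32.le_iff_toNat_le]
  constructor <;> intro h <;> exact h

theorem upperChar_of_not_islower (c : Char) (h : PySem.Chars.islower c = false) :
    PySem.Chars.upperChar c = c := by
  unfold PySem.Chars.upperChar
  rw [h]; simp

theorem lowerChar_upperChar (c : Char) (h : PySem.Chars.isalpha c = true) :
    PySem.Chars.lowerChar (PySem.Chars.upperChar c) = PySem.Chars.lowerChar c := by
  rcases Bool.or_eq_true_iff.mp (by simpa [PySem.Chars.isalpha] using h) with hu | hl
  · have hl' : PySem.Chars.islower c = false := by
      rcases (isupper_iff c).mp hu with ⟨h1, h2⟩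
      by_contra hc
      rcases (islower_iff c).mp (by simpa using hc) with ⟨h3, _⟩
      omega
    rw [upperChar_of_not_islower c hl']
  · rcases (islower_iff c).mp hl with ⟨h1, h2⟩
    have hv : (c.toNat - 32).isValidChar := Or.inl (by omega)
    have hup : PySem.Chars.upperChar c = Char.ofNat (c.toNat - 32) := by
      unfold PySem.Chars.upperChar; rw [hl]; simp
    have htn : (PySem.Chars.upperChar c).toNat = c.toNat - 32 := by
      rw [hup, Char.toNat_ofNat, if_pos hv]
    have hu2 : PySem.Chars.isupper (PySem.Chars.upperChar c) = true := by
      rw [isupper_iff, htn]; omega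
    have hnotu : PySem.Chars.isupper c = false := by
      by_contra hc
      rcases (isupper_iff c).mp (by simpa using hc) with ⟨_, h4⟩
      omega
    unfold PySem.Chars.lowerChar
    rw [hu2, hnotu]
    simp only [if_true]
    rw [htn]
    have : c.toNat - 32 + 32 = c.toNat := by omega
    rw [this, Char.ofNat_toNat]
    simp

theorem pvS_length (t : List Char) (P : List Nat) (m k : Nat) :
    (pvS t P m k).length = t.length := by
  rw [pvS, altSetUpper_eq_pvFold, altSetLower_eq_pvFold, pvFold_length, pvFold_length]

theorem take_append_pvW (P : List Nat) (m k : Nat) :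
    P.take (k - m) ++ pvW P m k = P.take k := by
  have h : P.take (k - m) = (P.take k).take (k - m) := by
    rw [List.take_take]; congr 1; omega
  rw [pvW, h, List.take_append_drop]

theorem pvS_getD (t : List Char) (P : List Nat) (m k q : Nat)
    (hnd : P.Nodup) (hlt : ∀ p ∈ P, p < t.length) :
    (pvS t P m k).getD q ' ' =
      if q ∈ P.take (k - m) then PySem.Chars.lowerChar (t.getD q ' ')
      else if q ∈ pvW P m k then PySem.Chars.upperChar (t.getD q ' ')
      else t.getD q ' ' := by
  have hdecomp : P.take (k - m) ++ pvW P m k = P.take k := take_append_pvW P m k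
  have hndk : (P.take k).Nodup := hnd.sublist (List.take_sublist _ _)
  rw [← hdecomp] at hndk
  rcases List.nodup_append.mp hndk with ⟨hndL, hndW, hdisj⟩
  have hltL : ∀ p ∈ P.take (k - m), p < t.length :=
    fun p hp => hlt p (List.mem_of_mem_take hp)
  have hltW : ∀ p ∈ pvW P m k, p < t.length :=
    fun p hp => hlt p (List.mem_of_mem_take (List.mem_of_mem_drop hp))
  have hinner := pvFold_getD PySem.Chars.lowerChar (P.take (k - m)) t hndL hltL q
  rw [pvS, altSetUpper_eq_pvFold, altSetLower_eq_pvFold]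
  rw [pvFold_getD PySem.Chars.upperChar (pvW P m k) _ hndW
    (by intro p hp; rw [pvFold_length]; exact hltW p hp) q]
  by_cases hqW : q ∈ pvW P m k
  · have hqL : q ∉ P.take (k - m) := fun hq => hdisj q hq q hqW rfl
    rw [if_pos hqW, if_neg hqL, if_pos hqW, hinner, if_neg hqL]
  · rw [if_neg hqW, if_neg hqW, hinner]

theorem set_getD_self (s : List Char) (i : Nat) (h : i < s.length) :
    s.set i (s.getD i ' ') = s := by
  rw [List.getD_eq_getElem?_getD, List.getElem?_eq_getElem h]
  simp

theorem getD_set_self (s : List Char) (i : Nat) (v : Char) (h : i < s.length) :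
    (s.set i v).getD i ' ' = v := by
  simp [List.getD_eq_getElem?_getD, List.getElem?_set_self h]

theorem getD_set_ne (s : List Char) (i q : Nat) (v : Char) (h : i ≠ q) :
    (s.set i v).getD q ' ' = s.getD q ' ' := by
  simp [List.getD_eq_getElem?_getD, List.getElem?_set_ne h]

theorem ext_getD (s u : List Char) (hl : s.length = u.length)
    (h : ∀ q, s.getD q ' ' = u.getD q ' ') : s = u := by
  apply List.ext_getElem hl
  intro q h1 h2
  have := h q
  rwa [List.getD_eq_getElem?_getD, List.getD_eq_getElem?_getD,
    List.getElem?_eq_getElem h1, List.getElem?_eq_getElem h2] at this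

theorem pv_head (P : List Nat) (hP : P.Pairwise (· < ·)) (k i : Nat)
    (htk : ∀ p ∈ P.take k, p < i) (hdk : ∀ p ∈ P.drop k, i ≤ p) (hi : i ∈ P) :
    ∃ h : k < P.length, P[k] = i := by
  have hisplit : i ∈ P.take k ∨ i ∈ P.drop k := by
    rw [← List.mem_append, List.take_append_drop]; exact hi
  have hidrop : i ∈ P.drop k := by
    rcases hisplit with h | h
    · exact absurd (htk i h) (lt_irrefl i)
    · exact h
  have hk : k < P.length := by
    by_contra hc
    rw [List.drop_eq_nil_of_le (by omega)] at hidrop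
    simp at hidrop
  refine ⟨hk, ?_⟩
  have hdropeq : P.drop k = P[k] :: P.drop (k+1) := List.drop_eq_getElem_cons hk
  have h1 : i ≤ P[k] := hdk _ (by rw [hdropeq]; exact List.mem_cons_self)
  have hpw : (P.drop k).Pairwise (· < ·) := hP.sublist (List.drop_sublist _ _)
  rw [hdropeq] at hpw
  rcases List.pairwise_cons.mp hpw with ⟨hlt, _⟩
  rw [hdropeq] at hidrop
  rcases List.mem_cons.mp hidrop with h | h
  · omega
  · have := hlt i h; omega

theorem pvW_subset_take (P : List Nat) (m k : Nat) : ∀ p ∈ pvW P m k, p ∈ P.take k :=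
  fun _ hp => List.mem_of_mem_drop hp

theorem take_sub_subset_take (P : List Nat) (m k : Nat) : ∀ p ∈ P.take (k - m), p ∈ P.take k := by
  intro p hp
  have h : P.take (k - m) = (P.take k).take (k - m) := by
    rw [List.take_take]; congr 1; omega
  rw [h] at hp
  exact List.mem_of_mem_take hp

theorem pvS_getD_untouched (t : List Char) (P : List Nat) (m k i : Nat)
    (hnd : P.Nodup) (hlt : ∀ p ∈ P, p < t.length)
    (hi : ∀ p ∈ P.take k, p < i) :
    (pvS t P m k).getD i ' ' = t.getD i ' ' := by
  rw [pvS_getD t P m k i hnd hlt]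
  have h1 : i ∉ P.take (k - m) := fun h => absurd (hi i (take_sub_subset_take P m k i h)) (lt_irrefl i)
  have h2 : i ∉ pvW P m k := fun h => absurd (hi i (pvW_subset_take P m k i h)) (lt_irrefl i)
  rw [if_neg h1, if_neg h2]

theorem pv_s1_eq (t : List Char) (P : List Nat) (m k i : Nat)
    (hnd : P.Nodup) (hlt : ∀ p ∈ P, p < t.length)
    (hi : ∀ p ∈ P.take k, p < i) (hilen : i < t.length) :
    (if PySem.Chars.islower (t.getD i ' ') then
        (pvS t P m k).set i (PySem.Chars.upperChar (t.getD i ' '))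
      else pvS t P m k)
      = (pvS t P m k).set i (PySem.Chars.upperChar (t.getD i ' ')) := by
  by_cases hl : PySem.Chars.islower (t.getD i ' ') = true
  · rw [if_pos hl]
  · rw [if_neg hl, upperChar_of_not_islower _ (by simpa using hl)]
    rw [← pvS_getD_untouched t P m k i hnd hlt hi]
    rw [set_getD_self _ _ (by rw [pvS_length]; exact hilen)]

theorem pv_main (t ansL : List Char) :
    ∀ (fuel k i : Nat),
      fuel + i = t.length →
      k ≤ (altPos t 0).length →
      (∀ p ∈ (altPos t 0).take k, p < i) →
      (∀ p ∈ (altPos t 0).drop k, i ≤ p) →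
      tryHiddenLoopA ansL fuel (pvS t (altPos t 0) ansL.length k)
          (pvC t (altPos t 0) ansL.length k) (pvW (altPos t 0) ansL.length k) i
        = tryHiddenLoopB t ansL (altPos t 0)
            ((altPos t 0).length - max k (max ansL.length 1 - 1))
            (max k (max ansL.length 1 - 1)) := by
  intro fuel
  induction fuel with
  | zero =>
    intro k i hfi hk htk hdk
    have hdrop : (altPos t 0).drop k = [] := by
      rcases List.eq_nil_or_concat ((altPos t 0).drop k) with h | ⟨l, a, h⟩
      · exact h
      · exfalso
        have ha : a ∈ (altPos t 0).drop k := by rw [h]; simp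
        have h1 := hdk a ha
        have h2 := (mem_altPos_zero t a).mp (List.mem_of_mem_drop ha)
        omega
    have hkn : (altPos t 0).length ≤ k := by
      have := List.drop_eq_nil_iff.mp hdrop
      omega
    have : (altPos t 0).length - max k (max ansL.length 1 - 1) = 0 := by omega
    rw [this]
    rfl
  | succ fuel ih =>
    intro k i hfi hk htk hdk
    have hilen : i < t.length := by omega
    set P := altPos t 0 with hPdef
    have hP : P.Pairwise (· < ·) := altPos_pairwise t 0
    have hnd : P.Nodup := hP.imp (fun h => Nat.ne_of_lt h)
    have hlt : ∀ p ∈ P, p < t.length := fun p hp => ((mem_altPos_zero t p).mp hp).1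
    have hSlen : (pvS t P ansL.length k).length = t.length := pvS_length t P ansL.length k
    have hgetDi : (pvS t P ansL.length k).getD i ' ' = t.getD i ' ' :=
      pvS_getD_untouched t P ansL.length k i hnd hlt htk
    rw [show tryHiddenLoopA ansL (fuel+1) (pvS t P ansL.length k) (pvC t P ansL.length k) (pvW P ansL.length k) i
        = if i < (pvS t P ansL.length k).length then
            (let c := (pvS t P ansL.length k).getD i ' '
             if PySem.Chars.isalpha c then
               let pos1 := pvW P ansL.length k ++ [i]
               let cur1 := pvC t P ansL.length k ++ [c]
               let s1 := if PySem.Chars.islower c then (pvS t P ansL.length k).set i (PySem.Chars.upperChar c) else pvS t P ansL.length k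
               let st :=
                 if ansL.length < cur1.length then
                   let p0 := pos1.headD 0
                   (s1.set p0 (PySem.Chars.lowerChar (s1.getD p0 ' ')), cur1.tail, pos1.tail)
                 else (s1, cur1, pos1)
               if st.2.1 = ansL then (true, some (wordsA st.1))
               else tryHiddenLoopA ansL fuel st.1 st.2.1 st.2.2 (i+1)
             else tryHiddenLoopA ansL fuel (pvS t P ansL.length k) (pvC t P ansL.length k) (pvW P ansL.length k) (i+1))
          else (false, none) from rfl]
    rw [if_pos (by rw [hSlen]; exact hilen)]
    simp only [hgetDi]
    by_cases halpha : PySem.Chars.isalpha (t.getD i ' ') = true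
    · rw [if_pos halpha]
      have hiP : i ∈ P := (mem_altPos_zero t i).mpr ⟨hilen, halpha⟩
      obtain ⟨hkn, hPk⟩ := pv_head P hP k i htk hdk hiP
      have htakek_len : (P.take k).length = k := by rw [List.length_take]; omega
      have htake1 : P.take (k+1) = P.take k ++ [i] := by
        rw [List.take_add_one, List.getElem?_eq_getElem hkn, hPk]; rfl
      have htk1 : ∀ p ∈ P.take (k+1), p < i+1 := by
        intro p hp; rw [htake1] at hp
        rcases List.mem_append.mp hp with h | h
        · have := htk p h; omega
        · simp at h; omega
      have hdk1 : ∀ p ∈ P.drop (k+1), i+1 ≤ p := by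
        have hdropeq : P.drop k = P[k] :: P.drop (k+1) := List.drop_eq_getElem_cons hkn
        have hpw : (P.drop k).Pairwise (· < ·) := hP.sublist (List.drop_sublist _ _)
        rw [hdropeq] at hpw
        intro p hp
        have := (List.pairwise_cons.mp hpw).1 p hp
        omega
      have hWlen : (pvW P ansL.length k).length = k - (k - ansL.length) := by
        rw [pvW, List.length_drop, htakek_len]
      have hClen : (pvC t P ansL.length k).length = k - (k - ansL.length) := by
        rw [pvC, List.length_map, hWlen]
      by_cases hkm : ansL.length ≤ k
      · -- EVICT: window is full, drop its first letter
        have hevict : ansL.length < (pvC t P ansL.length k ++ [t.getD i ' ']).length := by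
          rw [List.length_append, hClen]; simp; omega
        rw [if_pos hevict]
        dsimp only
        rw [pv_s1_eq t P ansL.length k i hnd hlt htk hilen]
        by_cases hm0 : ansL.length = 0
        · -- empty answer: the window is always empty and matches immediately
          have hansnil : ansL = [] := List.length_eq_zero_iff.mp hm0
          subst hansnil
          have hWknil : pvW P 0 k = [] := by
            rw [pvW, Nat.sub_zero, List.drop_eq_nil_of_le (le_of_eq htakek_len)]
          have hWk1nil : pvW P 0 (k+1) = [] := by
            rw [pvW, Nat.sub_zero, List.drop_eq_nil_of_le
              (le_of_eq (by rw [List.length_take]; omega))]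
          have hCknil : pvC t P 0 k = [] := by rw [pvC, hWknil]; rfl
          simp only [List.length_nil] at hWknil hCknil ⊢
          rw [hWknil, hCknil]
          have e1 : pvS t P 0 k = pvFold PySem.Chars.lowerChar t (P.take k) := by
            rw [pvS, Nat.sub_zero, hWknil]; rfl
          have e2 : pvS t P 0 (k+1) = pvFold PySem.Chars.lowerChar t (P.take (k+1)) := by
            rw [pvS, Nat.sub_zero, hWk1nil]; rfl
          have hgetDi0 : (pvS t P 0 k).getD i ' ' = t.getD i ' ' := hgetDi
          have hs2 : ((pvS t P 0 k).set i (PySem.Chars.upperChar (t.getD i ' '))).set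
              (([] ++ [i]).headD 0)
              (PySem.Chars.lowerChar (((pvS t P 0 k).set i
                (PySem.Chars.upperChar (t.getD i ' '))).getD (([] ++ [i]).headD 0) ' '))
              = pvS t P 0 (k+1) := by
            have hhead : ([] ++ [i] : List Nat).headD 0 = i := rfl
            rw [hhead, getD_set_self _ _ _ (by rw [pvS_length]; exact hilen), List.set_set,
              lowerChar_upperChar _ halpha, e2, htake1, pvFold_append, ← e1, hgetDi0]
          rw [hs2]
          rw [if_pos (show (([] : List Char) ++ [t.getD i ' ']).tail = ([] : List Char) from rfl)]
          have hmax : max k (max 0 1 - 1) = k := by omega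
          rw [hmax]
          have hfB : P.length - k = (P.length - (k+1)) + 1 := by omega
          rw [hfB]
          rw [show tryHiddenLoopB t [] P ((P.length - (k+1)) + 1) k
              = (if (altWindow P (k + 1 - ([] : List Char).length) k).map (fun p => t.getD p ' ') = ([] : List Char) then
                  (true, some (wordsA (altBuild t P (k + 1 - ([] : List Char).length) k)))
                else tryHiddenLoopB t [] P (P.length - (k+1)) (k+1)) from rfl]
          have hwinnil : (altWindow P (k + 1 - ([] : List Char).length) k).map (fun p => t.getD p ' ') = ([] : List Char) := by
            rw [altWindow]
            simp only [List.length_nil, Nat.sub_zero]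
            rw [List.drop_eq_nil_of_le (le_of_eq (by rw [List.length_take]; omega))]
            rfl
          rw [if_pos hwinnil]
          have hbuild : altBuild t P (k + 1 - ([] : List Char).length) k = pvS t P 0 (k+1) := by
            rw [altBuild, altWindow, pvS, pvW]
            simp only [List.length_nil, Nat.sub_zero]
          rw [hbuild]
        · -- nonempty answer: the window head P[k-m] is lowered back
          have hm1 : 1 ≤ ansL.length := by omega
          have hkmlt : k - ansL.length < (P.take k).length := by rw [htakek_len]; omega
          have hkmltP : k - ansL.length < P.length := by omega
          have hWeq : pvW P ansL.length k
              = P[k - ansL.length] :: (P.take k).drop (k - ansL.length + 1) := by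
            rw [pvW, List.drop_eq_getElem_cons hkmlt, List.getElem_take]
          have hWk1eq : pvW P ansL.length (k+1)
              = (P.take k).drop (k - ansL.length + 1) ++ [i] := by
            rw [pvW, htake1, show k + 1 - ansL.length = k - ansL.length + 1 from by omega,
              List.drop_append_of_le_length (by rw [htakek_len]; omega)]
          have htake1m : P.take (k + 1 - ansL.length)
              = P.take (k - ansL.length) ++ [P[k - ansL.length]] := by
            rw [show k + 1 - ansL.length = (k - ansL.length) + 1 from by omega,
              List.take_add_one, List.getElem?_eq_getElem hkmltP]
            rfl
          have hp0take : P[k - ansL.length] ∈ P.take k := by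
            rw [← take_append_pvW P ansL.length k]
            exact List.mem_append.mpr (Or.inr (hWeq ▸ List.mem_cons_self))
          have hp0i : P[k - ansL.length] < i := htk _ hp0take
          have hp0len : P[k - ansL.length] < t.length := hlt _ (List.mem_of_mem_take hp0take)
          have hp0alpha : PySem.Chars.isalpha (t.getD P[k - ansL.length] ' ') = true :=
            ((mem_altPos_zero t _).mp (List.mem_of_mem_take hp0take)).2
          have hp0notL : P[k - ansL.length] ∉ P.take (k - ansL.length) := by
            intro hmem
            have hndk : (P.take k).Nodup := hnd.sublist (List.take_sublist _ _)
            rw [← take_append_pvW P ansL.length k] at hndk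
            rcases List.nodup_append.mp hndk with ⟨_, _, hdisj⟩
            exact hdisj _ hmem _ (hWeq ▸ List.mem_cons_self) rfl
          have hhead : (pvW P ansL.length k ++ [i]).headD 0 = P[k - ansL.length] := by
            rw [hWeq]; rfl
          rw [hhead]
          -- the char sitting at the evicted position is the uppercased original
          have hs1get : ((pvS t P ansL.length k).set i
              (PySem.Chars.upperChar (t.getD i ' '))).getD P[k - ansL.length] ' '
              = PySem.Chars.upperChar (t.getD P[k - ansL.length] ' ') := by
            rw [getD_set_ne _ _ _ _ (by omega)]
            rw [pvS_getD t P ansL.length k _ hnd hlt, if_neg hp0notL,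
              if_pos (hWeq ▸ List.mem_cons_self)]
          rw [hs1get, lowerChar_upperChar _ hp0alpha]
          -- the new string state is exactly B's build at window (k+1)
          have hs2 : ((pvS t P ansL.length k).set i
                (PySem.Chars.upperChar (t.getD i ' '))).set P[k - ansL.length]
                (PySem.Chars.lowerChar (t.getD P[k - ansL.length] ' '))
              = pvS t P ansL.length (k+1) := by
            apply ext_getD
            · rw [List.length_set, List.length_set, pvS_length, pvS_length]
            · intro q
              rw [pvS_getD t P ansL.length (k+1) q hnd hlt]
              by_cases hq0 : q = P[k - ansL.length]
              · subst hq0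
                rw [getD_set_self _ _ _ (by rw [List.length_set, pvS_length]; exact hp0len)]
                rw [if_pos (htake1m ▸ List.mem_append.mpr (Or.inr List.mem_cons_self))]
              · rw [getD_set_ne _ _ _ _ (fun h => hq0 h.symm)]
                by_cases hqi : q = i
                · subst hqi
                  rw [getD_set_self _ _ _ (by rw [pvS_length]; exact hilen)]
                  have h1 : q ∉ P.take (k + 1 - ansL.length) := by
                    rw [htake1m]
                    intro hmem
                    rcases List.mem_append.mp hmem with h | h
                    · exact absurd (htk q (take_sub_subset_take P ansL.length k q h)) (lt_irrefl q)
                    · simp at h; omega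
                  rw [if_neg h1, if_pos (hWk1eq ▸ List.mem_append.mpr (Or.inr List.mem_cons_self))]
                · rw [getD_set_ne _ _ _ _ (fun h => hqi h.symm)]
                  rw [pvS_getD t P ansL.length k q hnd hlt]
                  have hiffL : q ∈ P.take (k - ansL.length) ↔ q ∈ P.take (k + 1 - ansL.length) := by
                    rw [htake1m]
                    constructor
                    · exact fun h => List.mem_append.mpr (Or.inl h)
                    · intro h
                      rcases List.mem_append.mp h with h | h
                      · exact h
                      · simp at h; exact absurd h hq0
                  have hiffW : q ∈ pvW P ansL.length k ↔ q ∈ pvW P ansL.length (k+1) := by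
                    rw [hWeq, hWk1eq]
                    constructor
                    · intro h
                      rcases List.mem_cons.mp h with h | h
                      · exact absurd h hq0
                      · exact List.mem_append.mpr (Or.inl h)
                    · intro h
                      rcases List.mem_append.mp h with h | h
                      · exact List.mem_cons_of_mem _ h
                      · simp at h; exact absurd h hqi
                  by_cases hL : q ∈ P.take (k - ansL.length)
                  · rw [if_pos hL, if_pos (hiffL.mp hL)]
                  · rw [if_neg hL, if_neg (fun h => hL (hiffL.mpr h))]
                    by_cases hW : q ∈ pvW P ansL.length k
                    · rw [if_pos hW, if_pos (hiffW.mp hW)]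
                    · rw [if_neg hW, if_neg (fun h => hW (hiffW.mpr h))]
          rw [hs2]
          -- tail of window positions / chars
          have hpos2 : (pvW P ansL.length k ++ [i]).tail = pvW P ansL.length (k+1) := by
            rw [hWeq, hWk1eq, List.cons_append, List.tail_cons]
          have hcur2 : (pvC t P ansL.length k ++ [t.getD i ' ']).tail = pvC t P ansL.length (k+1) := by
            rw [pvC, pvC, hWeq, hWk1eq, List.map_cons, List.cons_append, List.tail_cons,
              List.map_append]
            rfl
          rw [hpos2, hcur2]
          -- unfold B at j = k
          have hmax : max k (max ansL.length 1 - 1) = k := by omega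
          rw [hmax]
          have hfB : P.length - k = (P.length - (k+1)) + 1 := by omega
          rw [hfB]
          rw [show tryHiddenLoopB t ansL P ((P.length - (k+1)) + 1) k
              = (if (altWindow P (k + 1 - ansL.length) k).map (fun p => t.getD p ' ') = ansL then
                  (true, some (wordsA (altBuild t P (k + 1 - ansL.length) k)))
                else tryHiddenLoopB t ansL P (P.length - (k+1)) (k+1)) from rfl]
          have hwin : (altWindow P (k + 1 - ansL.length) k).map (fun p => t.getD p ' ')
              = pvC t P ansL.length (k+1) := by
            rw [altWindow, pvC, pvW]
          rw [hwin]
          by_cases hmatch : pvC t P ansL.length (k+1) = ansL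
          · rw [if_pos hmatch, if_pos hmatch]
            have hbuild : altBuild t P (k + 1 - ansL.length) k = pvS t P ansL.length (k+1) := by
              rw [altBuild, altWindow, pvS, pvW]
            rw [hbuild]
          · rw [if_neg hmatch, if_neg hmatch]
            have := ih (k+1) (i+1) (by omega) (by omega) htk1 hdk1
            rw [show max (k+1) (max ansL.length 1 - 1) = k + 1 from by omega] at this
            exact this
      · -- k < ansL.length : no eviction
        have hkm0 : k - ansL.length = 0 := by omega
        have hkm0' : k + 1 - ansL.length = 0 := by omega
        have hnoevict : ¬ (ansL.length < (pvC t P ansL.length k ++ [t.getD i ' ']).length) := by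
          rw [List.length_append, hClen]; simp; omega
        rw [if_neg hnoevict]
        dsimp only
        have hWk : pvW P ansL.length k = P.take k := by rw [pvW, hkm0, List.drop_zero]
        have hWk1 : pvW P ansL.length (k+1) = P.take (k+1) := by rw [pvW, hkm0', List.drop_zero]
        have e1 : pvS t P ansL.length k = pvFold PySem.Chars.upperChar t (P.take k) := by
          rw [pvS, hkm0, hWk, List.take_zero]; rfl
        have e2 : pvS t P ansL.length (k+1) = pvFold PySem.Chars.upperChar t (P.take (k+1)) := by
          rw [pvS, hkm0', hWk1, List.take_zero]; rfl
        have hs1 : (pvS t P ansL.length k).set i (PySem.Chars.upperChar (t.getD i ' '))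
            = pvS t P ansL.length (k+1) := by
          rw [e2, htake1, pvFold_append, ← e1, hgetDi]
        have hcur1 : pvC t P ansL.length k ++ [t.getD i ' '] = pvC t P ansL.length (k+1) := by
          rw [pvC, pvC, hWk1, htake1, hWk, List.map_append]; rfl
        have hpos1 : pvW P ansL.length k ++ [i] = pvW P ansL.length (k+1) := by
          rw [hWk, hWk1, htake1]
        rw [pv_s1_eq t P ansL.length k i hnd hlt htk hilen, hs1, hcur1, hpos1]
        have hClen1 : (pvC t P ansL.length (k+1)).length = k + 1 := by
          rw [pvC, List.length_map, pvW, List.length_drop, List.length_take, hkm0']; omega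
        by_cases hk1m : k + 1 = ansL.length
        · -- genuine window test, identical to B's test at j = k
          have hj0 : max k (max ansL.length 1 - 1) = k := by omega
          rw [hj0]
          have hfB : P.length - k = (P.length - (k+1)) + 1 := by omega
          rw [hfB]
          show _ = tryHiddenLoopB t ansL P ((P.length - (k+1)) + 1) k
          rw [show tryHiddenLoopB t ansL P ((P.length - (k+1)) + 1) k
              = (if (altWindow P (k + 1 - ansL.length) k).map (fun p => t.getD p ' ') = ansL then
                  (true, some (wordsA (altBuild t P (k + 1 - ansL.length) k)))
                else tryHiddenLoopB t ansL P (P.length - (k+1)) (k+1)) from rfl]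
          have hwin : (altWindow P (k + 1 - ansL.length) k).map (fun p => t.getD p ' ')
              = pvC t P ansL.length (k+1) := by
            rw [altWindow, hkm0', List.drop_zero, pvC, hWk1]
          rw [hwin]
          by_cases hmatch : pvC t P ansL.length (k+1) = ansL
          · rw [if_pos hmatch, if_pos hmatch]
            have hbuild : altBuild t P (k + 1 - ansL.length) k = pvS t P ansL.length (k+1) := by
              rw [altBuild, altWindow, pvS, pvW, hkm0']
            rw [hbuild]
          · rw [if_neg hmatch, if_neg hmatch]
            have := ih (k+1) (i+1) (by omega) (by omega) htk1 hdk1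
            rw [show max (k+1) (max ansL.length 1 - 1) = k + 1 from by omega] at this
            exact this
        · -- window still shorter than ans: the test fails by length on both sides
          have hne : pvC t P ansL.length (k+1) ≠ ansL := by
            intro h
            have := congrArg List.length h
            rw [hClen1] at this
            omega
          rw [if_neg hne]
          have := ih (k+1) (i+1) (by omega) (by omega) htk1 hdk1
          rw [show max (k+1) (max ansL.length 1 - 1) = max k (max ansL.length 1 - 1) from by omega] at this
          exact this
    · -- non-letter at i: skip
      rw [if_neg halpha]
      have hinotP : i ∉ P := by
        intro hiP
        exact halpha ((mem_altPos_zero t i).mp hiP).2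
      exact ih k (i+1) (by omega) hk (fun p hp => Nat.lt_succ_of_lt (htk p hp))
        (fun p hp => by
          have := hdk p hp
          have : p ≠ i := fun h => hinotP (h ▸ List.mem_of_mem_drop hp)
          omega)

-- ===== VERDICT (by name: the statement is the Claim_ definition above) =====
theorem try_hidden_spec : Claim_equal_try_hidden := by
  unfold Claim_equal_try_hidden
  intro nondefn ans _
  unfold Spec_try_hidden try_hidden try_hidden_alt
  have h := pv_main nondefn.toList ans.toList nondefn.toList.length 0 0
    (by omega) (by omega) (by simp) (fun p _ => Nat.zero_le p)
  have h0S : pvS nondefn.toList (altPos nondefn.toList 0) ans.toList.length 0 = nondefn.toList := by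
    simp [pvS, pvW, altSetLower, altSetUpper]
  have h0C : pvC nondefn.toList (altPos nondefn.toList 0) ans.toList.length 0 = [] := by
    simp [pvC, pvW]
  have h0W : pvW (altPos nondefn.toList 0) ans.toList.length 0 = [] := by
    simp [pvW]
  rw [h0S, h0C, h0W] at h
  rw [h]
  simp
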